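-- pv_equiv track=rewrite | github.com/aethiiis/advent-of-code | 2024/src/day14/day14.py | detect_lines
-- ===== SOURCE A (Python) =====
-- def detect_lines(positions, mode):
--     if mode == 0:
--         positions.sort(key=lambda p: (p[0], p[1]))
--     else:
--         positions.sort(key=lambda p: (p[1], p[0]))
--     count = 0
--     old_p = positions[0]
--     for i in range(1, len(positions)):
--         if positions[i][mode] != old_p[mode]:
--             count = 0
--         elif positions[i][(mode + 1) % 2] - old_p[(mode + 1) % 2] <= 2:
--             count += 1
--             if count >= 10:
--                 return True
--         old_p = positions[i]
--     return False
-- ===== SOURCE B (Python) =====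
-- def detect_lines(positions, mode):
--     if mode == 0:
--         positions.sort(key=lambda p: (p[0], p[1]))
--     else:
--         positions.sort(key=lambda p: (p[1], p[0]))
--     other = (mode + 1) % 2
--     rest = positions
--     while rest:
--         key = rest[0][mode]
--         group = []
--         while rest and rest[0][mode] == key:
--             group.append(rest[0])
--             rest = rest[1:]
--         count = 0
--         for prev, cur in zip(group, group[1:]):
--             if cur[other] - prev[other] <= 2:
--                 count += 1
--                 if count >= 10:
--                     return True
--     return False
-- ===== Notes on version B (the rewrite author's own statement) =====
-- stated objective: alternative
-- what changed: After the same in-place sort, B splits the list into maximal groups of equal mode-coordinate and counts close consecutive pairs inside each group, instead of A's single scan that carries old_p and resets the count on every coordinate change.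
-- outside the precondition, e.g. on detect_lines([[7, 7]], 5): A returns False, B raises IndexError
import Mathlib
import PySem

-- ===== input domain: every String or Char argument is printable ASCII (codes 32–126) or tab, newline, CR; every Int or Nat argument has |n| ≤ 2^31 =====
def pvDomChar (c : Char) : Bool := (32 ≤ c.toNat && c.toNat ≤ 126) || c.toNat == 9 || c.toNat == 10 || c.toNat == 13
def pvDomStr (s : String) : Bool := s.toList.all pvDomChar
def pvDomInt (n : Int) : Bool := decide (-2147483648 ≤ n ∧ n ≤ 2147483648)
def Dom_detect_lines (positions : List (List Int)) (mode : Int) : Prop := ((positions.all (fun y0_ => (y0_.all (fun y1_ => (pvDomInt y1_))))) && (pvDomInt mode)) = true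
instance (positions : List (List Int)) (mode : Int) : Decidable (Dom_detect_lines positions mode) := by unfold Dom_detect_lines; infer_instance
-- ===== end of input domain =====

-- B replaces A's reset-on-change scan by a split of the sorted list into maximal groups of
-- equal mode-coordinate with a per-group count of close consecutive pairs (objective:
-- alternative decomposition, same cost). Both A and B sort `positions` in place with the same
-- key; the equivalence proved here is about the RETURN value (the mutation is identical).


-- p[i] with Python indexing; inside Pre_ every index used is in range, so the default is never read
def gI (xs : List Int) (i : Int) : Int := (PySem.List.pyGet? xs i).getD 0

-- ===== PORT A =====
-- the for-loop over range(1, len) with carried old_p and count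
def detectA_loop (mode : Int) (old_p : List Int) (count : Int) : List (List Int) → Bool
  | [] => false
  | p :: rest =>
    if gI p mode ≠ gI old_p mode then detectA_loop mode p 0 rest
    else if gI p (PySem.Int.mod (mode + 1) 2) - gI old_p (PySem.Int.mod (mode + 1) 2) ≤ 2 then
      if count + 1 ≥ 10 then true else detectA_loop mode p (count + 1) rest
    else detectA_loop mode p count rest

-- positions[0] read plus the loop, on the sorted list ([] is where Python A raises IndexError; excluded by Pre_)
def detectA_go (mode : Int) : List (List Int) → Bool
  | [] => false
  | p0 :: rest => detectA_loop mode p0 0 rest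

def detect_lines (positions : List (List Int)) (mode : Int) : Bool :=
  detectA_go mode
    (if mode = 0 then PySem.List.sorted2 positions (fun p => gI p 0) (fun p => gI p 1)
     else PySem.List.sorted2 positions (fun p => gI p 1) (fun p => gI p 0))

-- ===== PORT B =====
-- the zip(group, group[1:]) counting loop of one group; `other` is B's precomputed (mode+1)%2
def scanPairs (other : Int) (count : Int) : List (List Int) → Bool
  | [] => false
  | [_] => false
  | p :: q :: t =>
    if gI q other - gI p other ≤ 2 then
      if count + 1 ≥ 10 then true else scanPairs other (count + 1) (q :: t)
    else scanPairs other count (q :: t)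

-- the outer while loop: peel one maximal group of equal mode-coordinate, scan it, continue.
-- The Nat argument is pure fuel (structural recursion guard); called with the list's length it
-- is never exhausted, since dropping a group strictly shortens the list.
def detectB_groups (mode other : Int) : Nat → List (List Int) → Bool
  | _, [] => false
  | 0, _ :: _ => false
  | fuel + 1, p :: t =>
    if scanPairs other 0 (p :: t.takeWhile (fun q => gI q mode == gI p mode)) then true
    else detectB_groups mode other fuel (t.dropWhile (fun q => gI q mode == gI p mode))

def detect_lines_alt (positions : List (List Int)) (mode : Int) : Bool :=
  let ps := if mode = 0 then PySem.List.sorted2 positions (fun p => gI p 0) (fun p => gI p 1)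
            else PySem.List.sorted2 positions (fun p => gI p 1) (fun p => gI p 0)
  detectB_groups mode (PySem.Int.mod (mode + 1) 2) ps.length ps

-- ===== PRECONDITION & SPEC =====
-- Pre_ excludes the raising inputs: the empty list (A raises IndexError at positions[0]),
-- inner lists shorter than 2 (the sort key raises), and an out-of-range mode — on which A
-- raises too except on a singleton list, whose only element A's loop never inspects but B's
-- group peeling reads (B raises IndexError there); that corner is the only excluded input A returns on.
def Pre_detect_lines (positions : List (List Int)) (mode : Int) : Prop :=
  positions ≠ [] ∧ (∀ p ∈ positions, 2 ≤ p.length) ∧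
    (∀ p ∈ positions, PySem.Raise.InRange p.length mode)
instance (positions : List (List Int)) (mode : Int) : Decidable (Pre_detect_lines positions mode) := by unfold Pre_detect_lines; infer_instance
def pvWitness_detect_lines : List (List Int) × Int := ([[0, 0], [1, 1]], 0)

def Spec_detect_lines (positions : List (List Int)) (mode : Int) (out : Bool) : Prop := out = detect_lines_alt positions mode
instance (positions : List (List Int)) (mode : Int) (out : Bool) : Decidable (Spec_detect_lines positions mode out) := by unfold Spec_detect_lines; infer_instance

-- ===== CLAIM (what is proved, stated in full; the proofs are below) =====
def Claim_equal_detect_lines : Prop := ∀ (positions : List (List Int)) (mode : Int), Dom_detect_lines positions mode → Pre_detect_lines positions mode → Spec_detect_lines positions mode (detect_lines positions mode)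

-- ===== LEMMAS AND PROOFS =====

lemma groups_cons (mode other : Int) (p : List Int) (t : List (List Int)) (fuel : Nat) :
    detectB_groups mode other (fuel + 1) (p :: t) =
      (scanPairs other 0 (p :: t.takeWhile (fun q => gI q mode == gI p mode)) ||
       detectB_groups mode other fuel (t.dropWhile (fun q => gI q mode == gI p mode))) := by
  rw [detectB_groups]
  cases scanPairs other 0 (p :: t.takeWhile (fun q => gI q mode == gI p mode)) <;> simp

lemma loop_eq (mode : Int) :
    ∀ (t : List (List Int)) (p : List Int) (count : Int) (fuel : Nat), t.length ≤ fuel →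
      detectA_loop mode p count t =
        (scanPairs (PySem.Int.mod (mode + 1) 2) count
            (p :: t.takeWhile (fun q => gI q mode == gI p mode)) ||
         detectB_groups mode (PySem.Int.mod (mode + 1) 2) fuel
            (t.dropWhile (fun q => gI q mode == gI p mode))) := by
  intro t
  induction t with
  | nil =>
    intro p count fuel _
    cases fuel <;> simp [detectA_loop, scanPairs, detectB_groups]
  | cons q t' ih =>
    intro p count fuel hfuel
    by_cases hq : gI q mode = gI p mode
    · have hpred : (fun r => gI r mode == gI q mode) = (fun r => gI r mode == gI p mode) := by
        funext r; rw [hq]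
      have hlen : t'.length ≤ fuel := by simp at hfuel; omega
      rw [detectA_loop]
      simp only [hq, ne_eq, not_true_eq_false, if_false,
        List.takeWhile_cons, List.dropWhile_cons, beq_self_eq_true, if_true]
      by_cases hd : gI q (PySem.Int.mod (mode + 1) 2) - gI p (PySem.Int.mod (mode + 1) 2) ≤ 2
      · by_cases h10 : count + 1 ≥ 10
        · rw [if_pos hd, if_pos h10, scanPairs, if_pos hd, if_pos h10]; simp
        · rw [if_pos hd, if_neg h10, ih q (count + 1) fuel hlen, hpred, scanPairs,
            if_pos hd, if_neg h10]
      · rw [if_neg hd, ih q count fuel hlen, hpred, scanPairs, if_neg hd]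
    · obtain ⟨fuel', rfl⟩ : ∃ f, fuel = f + 1 := by
        cases fuel
        · simp at hfuel
        · exact ⟨_, rfl⟩
      have hlen : t'.length ≤ fuel' := by simp at hfuel; omega
      have hqb : (gI q mode == gI p mode) = false := by simp [hq]
      rw [detectA_loop]
      simp only [hq, ne_eq, not_false_eq_true, if_true,
        List.takeWhile_cons, List.dropWhile_cons, hqb, Bool.false_eq_true, if_false]
      rw [ih q 0 fuel' hlen, groups_cons]
      simp [scanPairs]

lemma detect_eq (positions : List (List Int)) (mode : Int) :
    detect_lines positions mode = detect_lines_alt positions mode := by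
  unfold detect_lines detect_lines_alt
  cases hps : (if mode = 0 then PySem.List.sorted2 positions (fun p => gI p 0) (fun p => gI p 1)
               else PySem.List.sorted2 positions (fun p => gI p 1) (fun p => gI p 0)) with
  | nil => simp [detectA_go, detectB_groups]
  | cons p0 rest =>
    simp only [detectA_go, List.length_cons]
    rw [groups_cons, loop_eq mode rest p0 0 rest.length le_rfl]

-- ===== VERDICT (by name: the statement is the Claim_ definition above) =====
theorem detect_lines_spec : Claim_equal_detect_lines := by
  intro positions mode _ _
  exact detect_eq positions mode
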